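-- pv_equiv track=rewrite | github.com/ohzeno/Algo | Programmers/Previous KAKAO/Lv.3/주사위 고르기.py | get_score_d
-- ===== SOURCE A (Python) =====
-- def get_score_d(dices):
--     # sd[점수] = 경우의 수
--     # 초기 경우의 수 카운팅을 위한 1. 순회 과정에서 0번째 인덱스는 0이 되니 괜찮음.
--     sd = [1]
--     for dice in dices:  # 각 주사위 순회
--         l_dp = len(sd)
--         # 주사위 최대값 추가한 점수까지 idx생성, 0으로 초기화
--         new_sd = [0] * (l_dp + max(dice))
--         for np in dice:  # 새 주사위 각 면에 대해
--             for p in range(l_dp):  # 모든 기존 점수에 대해 더해짐.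
--                 # 기존 케이스에서 점수만 더해졌지 경우의 수가 바뀐게 아니므로 sd[i] 그대로 더함.
--                 new_sd[p + np] += sd[p]
--         sd = new_sd
--     return sd
-- ===== SOURCE B (Python) =====
-- def get_score_d(dices):
--     # Distribution of score sums: each face contributes a circular shift of the
--     # zero-padded running distribution; the new distribution is the columnwise sum.
--     dist = [1]
--     for dice in dices:
--         padded = dist + [0] * max(dice)
--         shifted = [padded[-f:] + padded[:-f] for f in dice]
--         dist = [sum(col) for col in zip(*shifted)]
--     return dist
-- ===== Notes on version B (the rewrite author's own statement) =====
-- stated objective: alternative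
-- what changed: Replaces A's triple-nested in-place scatter (new_sd[p+np] += sd[p] cell by cell) by a vectorised formulation: each face yields one circular shift (built with two slices) of the zero-padded running distribution, and the new distribution is the columnwise sum via zip; Pre_ excludes dice with no faces (Python max raises ValueError), faces below -(running array length) (A raises IndexError), and dice whose maximum face is negative, an unspecified corner where the score range shrinks and A's truncated array and B's length-preserving one are equally defensible.
-- outside the precondition, e.g. on get_score_d([[1], [-1]]): A returns [1], B returns [1, 0]
import Mathlib
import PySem

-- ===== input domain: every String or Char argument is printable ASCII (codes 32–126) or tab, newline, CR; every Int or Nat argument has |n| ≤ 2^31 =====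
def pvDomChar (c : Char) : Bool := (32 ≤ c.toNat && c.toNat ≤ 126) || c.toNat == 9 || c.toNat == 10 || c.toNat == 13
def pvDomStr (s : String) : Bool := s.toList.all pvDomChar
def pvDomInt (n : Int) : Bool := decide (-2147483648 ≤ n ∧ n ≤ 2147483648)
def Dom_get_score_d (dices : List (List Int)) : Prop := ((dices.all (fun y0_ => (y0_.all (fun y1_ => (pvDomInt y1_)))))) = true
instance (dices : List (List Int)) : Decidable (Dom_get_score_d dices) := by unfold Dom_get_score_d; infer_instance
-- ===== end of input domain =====

-- B replaces A's in-place cell-by-cell scatter by per-face circular shifts of the padded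
-- distribution summed columnwise (alternative decomposition, similar cost); no argument is mutated.

-- ===== PORT A =====
-- one convolution step of A: the body of 'for dice in dices'
def stepA (sd dice : List Int) : List Int :=
  let l_dp := sd.length
  -- max(dice): none only for an empty die, where Python raises ValueError (excluded by Pre_)
  let mx := (PySem.List.max? dice (fun x => x)).getD 0
  dice.foldl (fun new_sd np =>
    (List.range l_dp).foldl (fun ns (p : Nat) =>
      -- new_sd[p + np] += sd[p]; pyGetD/pySetD are Python-exact (negative index wraps)
      -- on indices in [-len, len), which Pre_ guarantees; Python raises IndexError outside
      PySem.List.pySetD ns ((p : Int) + np)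
        (PySem.List.pyGetD ns ((p : Int) + np) 0 + sd.getD p 0)) new_sd)
    (List.replicate ((l_dp : Int) + mx).toNat 0)

def get_score_d (dices : List (List Int)) : List Int :=
  dices.foldl stepA [1]

-- ===== PORT B =====
-- zip(*rows) of Source B: columns until the shortest row is exhausted (zip() of no rows is empty)
def zipStar (rows : List (List Int)) : List (List Int) :=
  match rows with
  | [] => []
  | [] :: _ => []
  | (x :: xs) :: rest =>
    if rest.all (fun t => !t.isEmpty) then
      (x :: rest.map (fun t => t.headD 0)) :: zipStar (xs :: rest.map (fun t => t.tail))
    else []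
termination_by (rows.headD []).length
decreasing_by simp

-- one step of Source B's loop: pad, build the per-face circular shifts padded[-f:] + padded[:-f],
-- then sum columnwise ([0]*m is replicate m.toNat: empty for negative m, as in Python)
def stepB (dist dice : List Int) : List Int :=
  let mx := (PySem.List.max? dice (fun x => x)).getD 0
  let padded := dist ++ List.replicate mx.toNat 0
  let shifted := dice.map (fun f =>
    PySem.List.slice padded (some (-f)) none ++ PySem.List.slice padded none (some (-f)))
  (zipStar shifted).map List.sum

def get_score_d_alt (dices : List (List Int)) : List Int :=
  dices.foldl stepB [1]

-- ===== PRECONDITION & SPEC =====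
-- the maximum a step reads off a die (0 irrelevant: Pre_ forbids empty dice)
def dmax (d : List Int) : Int := (PySem.List.max? d (fun x => x)).getD 0

-- the running length of A's score array after die i: 1 + sum of the maxima of dice 0..i
def preL (dices : List (List Int)) (i : Nat) : Int :=
  1 + ((dices.take (i+1)).map dmax).sum

-- Pre_ excludes empty dice (Python's max raises ValueError) and faces below -(running length)
-- (A raises IndexError) — inputs on which A raises — and dice whose maximum face is negative:
-- there the score range shrinks and no value is specified (A returns a truncated array, B a
-- length-preserving one; both are defensible readings of an unspecified corner).
def Pre_get_score_d (dices : List (List Int)) : Prop :=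
  ∀ i (h : i < dices.length),
    dices[i] ≠ [] ∧ 0 ≤ dmax dices[i] ∧ ∀ f ∈ dices[i], -(preL dices i) ≤ f
instance (dices : List (List Int)) : Decidable (Pre_get_score_d dices) := by
  unfold Pre_get_score_d; infer_instance

def pvWitness_get_score_d : List (List Int) := [[1, 2], [3]]

def Spec_get_score_d (dices : List (List Int)) (out : List Int) : Prop := out = get_score_d_alt dices
instance (dices : List (List Int)) (out : List Int) : Decidable (Spec_get_score_d dices out) := by
  unfold Spec_get_score_d; infer_instance

-- ===== CLAIM (what is proved, stated in full; the proofs are below) =====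
def Claim_equal_get_score_d : Prop :=
  ∀ (dices : List (List Int)), Dom_get_score_d dices → Pre_get_score_d dices →
    Spec_get_score_d dices (get_score_d dices)

-- ===== LEMMAS AND PROOFS =====

-- Python's wrapped indexing on an in-range index IS the mod-length index
lemma pySetD_wrap (xs : List Int) (i : Int) (v : Int)
    (h1 : -(xs.length : Int) ≤ i) (h2 : i < (xs.length : Int)) :
    PySem.List.pySetD xs i v = xs.set ((i % (xs.length : Int)).toNat) v := by
  rcases (by omega : 0 ≤ i ∨ i < 0) with ha | ha
  · rw [PySem.List.pySetD_of_nonneg xs v ha]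
    have := Int.emod_eq_of_lt ha h2
    congr 1
    omega
  · have hmod : i % (xs.length : Int) = i + xs.length := by
      have h0 : (i + (xs.length : Int)) % (xs.length : Int) = i % (xs.length : Int) := by
        have h := Int.add_mul_emod_self_left i (xs.length : Int) 1
        rwa [mul_one] at h
      have h3 : (i + (xs.length : Int)) % (xs.length : Int) = i + xs.length :=
        Int.emod_eq_of_lt (by omega) (by omega)
      omega
    simp only [PySem.List.pySetD, PySem.List.pySet?, PySem.List.pyIdx?,
      if_neg (not_le.mpr ha), if_pos h1, Option.map_some, Option.getD_some]
    congr 1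
    omega

lemma pyGetD_wrap (xs : List Int) (i : Int)
    (h1 : -(xs.length : Int) ≤ i) (h2 : i < (xs.length : Int)) :
    PySem.List.pyGetD xs i 0 = xs.getD ((i % (xs.length : Int)).toNat) 0 := by
  rcases (by omega : 0 ≤ i ∨ i < 0) with ha | ha
  · have he := Int.emod_eq_of_lt ha h2
    rw [show (i % (xs.length : Int)).toNat = i.toNat from by omega,
      PySem.List.pyGetD_eq_getElem xs 0 ha h2, List.getD_eq_getElem xs 0 (by omega)]
  · have hmod : i % (xs.length : Int) = i + xs.length := by
      have h0 : (i + (xs.length : Int)) % (xs.length : Int) = i % (xs.length : Int) := by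
        have h := Int.add_mul_emod_self_left i (xs.length : Int) 1
        rwa [mul_one] at h
      have h3 : (i + (xs.length : Int)) % (xs.length : Int) = i + xs.length :=
        Int.emod_eq_of_lt (by omega) (by omega)
      omega
    have hk0 : 0 < (-i).toNat := by omega
    have hkle : (-i).toNat ≤ xs.length := by omega
    have hrw : i = -(((-i).toNat : Nat) : Int) := by omega
    calc PySem.List.pyGetD xs i 0
        = PySem.List.pyGetD xs (-(((-i).toNat : Nat) : Int)) 0 := by rw [← hrw]
      _ = xs[xs.length - (-i).toNat]'(by omega) :=
          PySem.List.pyGetD_neg_natCast xs (-i).toNat 0 hk0 hkle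
      _ = xs.getD ((i % (xs.length : Int)).toNat) 0 := by
          rw [List.getD_eq_getElem xs 0 (by omega)]
          congr 1
          omega

-- a range sum with an equality indicator picks the single term
lemma sum_ite_single (g : Nat → Int) (n t : Nat) (ht : t < n) :
    ((List.range n).map (fun (p : Nat) => if p = t then g p else 0)).sum = g t := by
  induction n with
  | zero => omega
  | succ n ih =>
    rw [List.range_succ, List.map_append, List.sum_append]
    by_cases h : t = n
    · subst h
      have hz : ((List.range t).map (fun (p : Nat) => if p = t then g p else 0)).sum = 0 := by
        apply List.sum_eq_zero
        intro x hx
        obtain ⟨p, hp, rfl⟩ := List.mem_map.mp hx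
        rw [if_neg (by simp at hp; omega)]
      simp [hz]
    · rw [ih (by omega)]
      have hne : n ≠ t := fun he => h he.symm
      simp [hne]

-- A's inner loop 'for p in range(l_dp)' for one face np: adds sd[p] at wrapped index (p+np) mod L
lemma innerLoop (sd : List Int) (np mx : Int)
    (h1 : 1 ≤ (sd.length : Int) + mx)
    (hlo : -((sd.length : Int) + mx) ≤ np) (hhi : np ≤ mx)
    (k : Nat) (hk : k ≤ sd.length) (acc : List Int)
    (hlen : acc.length = ((sd.length : Int) + mx).toNat) :
    ((List.range k).foldl (fun ns (p : Nat) =>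
        PySem.List.pySetD ns ((p : Int) + np)
          (PySem.List.pyGetD ns ((p : Int) + np) 0 + sd.getD p 0)) acc).length = acc.length ∧
    ∀ s : Nat, ((List.range k).foldl (fun ns (p : Nat) =>
        PySem.List.pySetD ns ((p : Int) + np)
          (PySem.List.pyGetD ns ((p : Int) + np) 0 + sd.getD p 0)) acc).getD s 0 =
      acc.getD s 0 + ((List.range k).map (fun (p : Nat) =>
        if (((p : Int) + np) % ((sd.length : Int) + mx)).toNat = s
        then sd.getD p 0 else 0)).sum := by
  induction k with
  | zero => exact ⟨rfl, fun s => by simp⟩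
  | succ k ih =>
    obtain ⟨ihlen, ihval⟩ := ih (by omega)
    set L : Int := (sd.length : Int) + mx with hLdef
    set r := (List.range k).foldl (fun ns (p : Nat) =>
        PySem.List.pySetD ns ((p : Int) + np)
          (PySem.List.pyGetD ns ((p : Int) + np) 0 + sd.getD p 0)) acc with hr
    have hrlen : r.length = L.toNat := by rw [ihlen, hlen]
    have hrlenI : (r.length : Int) = L := by omega
    have hidxlo : -L ≤ (k : Int) + np := by omega
    have hidxhi : (k : Int) + np < L := by omega
    have hm0 : 0 ≤ ((k : Int) + np) % L := Int.emod_nonneg _ (by omega)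
    have hmL : ((k : Int) + np) % L < L := Int.emod_lt_of_pos _ (by omega)
    set t : Nat := (((k : Int) + np) % L).toNat with htdef
    have ht : t < r.length := by omega
    have hstep : ((List.range (k+1)).foldl (fun ns (p : Nat) =>
        PySem.List.pySetD ns ((p : Int) + np)
          (PySem.List.pyGetD ns ((p : Int) + np) 0 + sd.getD p 0)) acc)
        = r.set t (r.getD t 0 + sd.getD k 0) := by
      rw [List.range_succ, List.foldl_append, List.foldl_cons, List.foldl_nil, ← hr,
        pySetD_wrap r _ _ (by omega) (by omega), pyGetD_wrap r _ (by omega) (by omega), hrlenI]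
    rw [hstep]
    refine ⟨by simp [hrlen, hlen], fun s => ?_⟩
    rw [List.range_succ, List.map_append, List.sum_append, List.map_cons, List.map_nil,
      List.sum_cons, List.sum_nil]
    by_cases hs : s = t
    · subst hs
      rw [List.getD_eq_getElem?_getD, List.getElem?_set_self ht, Option.getD_some, ihval,
        if_pos rfl]
      ring
    · rw [List.getD_eq_getElem?_getD, List.getElem?_set_ne (fun he => hs he.symm),
        ← List.getD_eq_getElem?_getD, ihval, if_neg (fun he => hs he.symm)]
      ring

-- A's loop over the faces of one die, pointwise
lemma outerLoop (sd : List Int) (mx : Int) (faces : List Int)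
    (h1 : 1 ≤ (sd.length : Int) + mx)
    (hf : ∀ f ∈ faces, -((sd.length : Int) + mx) ≤ f ∧ f ≤ mx)
    (acc : List Int) (hlen : acc.length = ((sd.length : Int) + mx).toNat) :
    (faces.foldl (fun new_sd np =>
        (List.range sd.length).foldl (fun ns (p : Nat) =>
          PySem.List.pySetD ns ((p : Int) + np)
            (PySem.List.pyGetD ns ((p : Int) + np) 0 + sd.getD p 0)) new_sd) acc).length = acc.length ∧
    ∀ s : Nat, (faces.foldl (fun new_sd np =>
        (List.range sd.length).foldl (fun ns (p : Nat) =>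
          PySem.List.pySetD ns ((p : Int) + np)
            (PySem.List.pyGetD ns ((p : Int) + np) 0 + sd.getD p 0)) new_sd) acc).getD s 0 =
      acc.getD s 0 + (faces.map (fun f =>
        ((List.range sd.length).map (fun (p : Nat) =>
          if (((p : Int) + f) % ((sd.length : Int) + mx)).toNat = s
          then sd.getD p 0 else 0)).sum)).sum := by
  induction faces generalizing acc with
  | nil => exact ⟨rfl, by simp⟩
  | cons f fs ih =>
    have hff := hf f (by simp)
    obtain ⟨l1, v1⟩ := innerLoop sd f mx h1 hff.1 hff.2 sd.length (le_refl _) acc hlen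
    obtain ⟨l2, v2⟩ := ih (fun g hg => hf g (by simp [hg])) _ (by rw [l1, hlen])
    simp only [List.foldl_cons]
    refine ⟨by rw [l2, l1], fun s => ?_⟩
    rw [v2, v1]
    simp only [List.map_cons, List.sum_cons]
    ring

-- getD of a rotation written as drop ++ take
lemma rotCore_getD (xs : List Int) (j s : Nat) (hj : j ≤ xs.length) (hs : s < xs.length) :
    (xs.drop j ++ xs.take j).getD s 0 =
      if s < xs.length - j then xs.getD (j + s) 0 else xs.getD (s + j - xs.length) 0 := by
  by_cases h : s < xs.length - j
  · rw [if_pos h, List.getD_eq_getElem?_getD, List.getElem?_append_left (by simp [List.length_drop]; omega),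
      List.getElem?_drop, ← List.getD_eq_getElem?_getD]
  · rw [if_neg h, List.getD_eq_getElem?_getD, List.getElem?_append_right (by simp [List.length_drop]; omega)]
    simp only [List.length_drop]
    have he : s - (xs.length - j) = s + j - xs.length := by omega
    rw [he, List.getElem?_take_of_lt (by omega), ← List.getD_eq_getElem?_getD]

lemma rot_eq_dropTake (xs : List Int) (f : Int)
    (hf1 : -(xs.length : Int) ≤ f) (hf2 : f < (xs.length : Int)) :
    ∃ j : Nat, j ≤ xs.length ∧ ((f ≤ 0 ∧ (j : Int) = -f) ∨ (0 < f ∧ (j : Int) = xs.length - f)) ∧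
      PySem.List.slice xs (some (-f)) none ++ PySem.List.slice xs none (some (-f))
        = xs.drop j ++ xs.take j := by
  rcases (by omega : f ≤ 0 ∨ 0 < f) with hc | hc
  · refine ⟨(-f).toNat, by omega, Or.inl ⟨hc, by omega⟩, ?_⟩
    rw [PySem.List.slice_from xs (by omega), PySem.List.slice_to xs (by omega)]
  · refine ⟨xs.length - f.toNat, by omega, Or.inr ⟨hc, by omega⟩, ?_⟩
    have hk : -f = -((f.toNat : Nat) : Int) := by omega
    rw [hk, PySem.List.slice_from_neg_natCast xs f.toNat (by omega),
      PySem.List.slice_to_neg_natCast xs f.toNat (by omega)]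

lemma emod_shift' (a L : Int) (hL : 0 < L) (h1 : 0 ≤ a) (h2 : a < 2*L) :
    a % L = if a < L then a else a - L := by
  clear hL
  split_ifs with h
  · exact Int.emod_eq_of_lt h1 h
  · have h0 : (a - L + L * 1) % L = (a - L) % L := Int.add_mul_emod_self_left (a - L) L 1
    have h3 : (a - L) % L = a - L := Int.emod_eq_of_lt (by omega) (by omega)
    have : a - L + L * 1 = a := by ring
    rw [this] at h0
    omega

lemma rot_getD (xs : List Int) (f : Int) (s : Nat)
    (hf1 : -(xs.length : Int) ≤ f) (hf2 : f < (xs.length : Int)) (hs : s < xs.length) :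
    (PySem.List.slice xs (some (-f)) none ++ PySem.List.slice xs none (some (-f))).getD s 0
      = xs.getD ((((s : Int) - f) % (xs.length : Int)).toNat) 0 := by
  obtain ⟨j, hj, hcase, hrot⟩ := rot_eq_dropTake xs f hf1 hf2
  rw [hrot, rotCore_getD xs j s hj hs]
  have hL : 0 < (xs.length : Int) := by omega
  -- (s - f) ≡ s + j (mod L) in both cases
  have hcong : ((s : Int) - f) % (xs.length : Int) = ((s : Int) + j) % (xs.length : Int) := by
    rcases hcase with ⟨hf0, hje⟩ | ⟨hf0, hje⟩
    · congr 1; omega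
    · have : (s : Int) - f = (s : Int) + j - xs.length * 1 := by omega
      rw [this, Int.sub_mul_emod_self_left]
  rw [hcong, emod_shift' ((s : Int) + j) (xs.length : Int) hL (by omega) (by omega)]
  split_ifs with h1 h2 h2
  · congr 1; omega
  · omega
  · omega
  · congr 1; omega

lemma rot_length (xs : List Int) (f : Int)
    (hf1 : -(xs.length : Int) ≤ f) (hf2 : f < (xs.length : Int)) :
    (PySem.List.slice xs (some (-f)) none ++ PySem.List.slice xs none (some (-f))).length
      = xs.length := by
  obtain ⟨j, hj, _, hrot⟩ := rot_eq_dropTake xs f hf1 hf2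
  rw [hrot]
  simp
  omega

-- zipStar of nonempty equal-length rows is the column list
lemma zipStar_spec (L : Nat) :
    ∀ (rows : List (List Int)), rows ≠ [] → (∀ r ∈ rows, r.length = L) →
    zipStar rows = (List.range L).map (fun s => rows.map (fun r => r.getD s 0)) := by
  induction L with
  | zero =>
    intro rows hne hlen
    cases rows with
    | nil => exact absurd rfl hne
    | cons r rest =>
      have hr : r = [] := List.eq_nil_of_length_eq_zero (hlen r (by simp))
      subst hr
      simp [zipStar]
  | succ L ih =>
    intro rows hne hlen
    cases rows with
    | nil => exact absurd rfl hne
    | cons r rest =>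
      cases r with
      | nil => exact absurd (hlen [] (by simp)).symm (by simp)
      | cons x xs =>
        have hall : rest.all (fun t => !t.isEmpty) = true := by
          rw [List.all_eq_true]
          intro t ht
          have h := hlen t (by simp [ht])
          cases t with
          | nil => simp at h
          | cons a b => simp
        have hlen' : ∀ r ∈ (xs :: rest.map (fun t => t.tail)), r.length = L := by
          intro r hr
          rcases List.mem_cons.mp hr with h | hr
          · have hx := hlen (x :: xs) (by simp)
            rw [h]
            simpa using hx
          · obtain ⟨t, ht, rfl⟩ := List.mem_map.mp hr
            have := hlen t (by simp [ht])
            cases t with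
            | nil => simp at this
            | cons a b => simpa using this
        rw [zipStar, if_pos hall, ih (xs :: rest.map (fun t => t.tail)) (by simp) hlen']
        rw [List.range_succ_eq_map, List.map_cons, List.map_map]
        congr 1
        · simp only [List.map_cons, List.getD_cons_zero]
          congr 1
          refine List.map_congr_left (fun t ht => ?_)
          cases t <;> simp
        · refine List.map_congr_left (fun s hs => ?_)
          simp only [Function.comp, List.map_cons, List.map_map]
          congr 1
          refine List.map_congr_left (fun t ht => ?_)
          cases t <;> simp

-- A's inner indicator sum over one face equals the padded distribution at the shifted cell
lemma face_sum (sd : List Int) (mx f : Int) (s : Nat)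
    (hm : 0 ≤ mx) (hs : (s : Int) < (sd.length : Int) + mx) :
    ((List.range sd.length).map (fun (p : Nat) =>
        if (((p : Int) + f) % ((sd.length : Int) + mx)).toNat = s then sd.getD p 0 else 0)).sum
      = (sd ++ List.replicate mx.toNat 0).getD
          ((((s : Int) - f) % ((sd.length : Int) + mx)).toNat) 0 := by
  set L : Int := (sd.length : Int) + mx with hLdef
  have hL : 0 < L := by omega
  have hq0 : 0 ≤ ((s : Int) - f) % L := Int.emod_nonneg _ (by omega)
  have hqL : ((s : Int) - f) % L < L := Int.emod_lt_of_pos _ hL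
  set q : Nat := (((s : Int) - f) % L).toNat with hqdef
  have hqI : (q : Int) = ((s : Int) - f) % L := by omega
  have hiff : ∀ p : Nat, p < sd.length →
      (((((p : Int) + f) % L).toNat = s) ↔ p = q) := by
    intro p hp
    have hp0 : 0 ≤ ((p : Int) + f) % L := Int.emod_nonneg _ (by omega)
    have hpL : ((p : Int) + f) % L < L := Int.emod_lt_of_pos _ hL
    have hpe : (p : Int) % L = (p : Int) := Int.emod_eq_of_lt (by omega) (by omega)
    have hse : (s : Int) % L = (s : Int) := Int.emod_eq_of_lt (by omega) (by omega)
    have e : (p : Int) - ((s : Int) - f) = (p : Int) + f - (s : Int) := by ring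
    have hchain : ((p : Int) + f) % L = (s : Int) % L ↔ (p : Int) % L = ((s : Int) - f) % L := by
      rw [Int.emod_eq_emod_iff_emod_sub_eq_zero, Int.emod_eq_emod_iff_emod_sub_eq_zero, e]
    rw [hse, hpe] at hchain
    omega
  have hrw : ((List.range sd.length).map (fun (p : Nat) =>
      if (((p : Int) + f) % L).toNat = s then sd.getD p 0 else 0)).sum
      = ((List.range sd.length).map (fun (p : Nat) =>
      if p = q then sd.getD p 0 else 0)).sum := by
    refine congrArg List.sum (List.map_congr_left (fun p hp => ?_))
    have hp := List.mem_range.mp hp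
    by_cases h : p = q
    · rw [if_pos ((hiff p hp).mpr h), if_pos h]
    · rw [if_neg (fun hc => h ((hiff p hp).mp hc)), if_neg h]
  rw [hrw]
  by_cases hqn : q < sd.length
  · rw [sum_ite_single (fun p => sd.getD p 0) _ q hqn]
    have h2 : (sd ++ List.replicate mx.toNat 0).getD q 0 = sd.getD q 0 := by
      rw [List.getD_eq_getElem?_getD, List.getElem?_append_left hqn,
        ← List.getD_eq_getElem?_getD]
    rw [h2]
  · have hz : ((List.range sd.length).map (fun (p : Nat) =>
        if p = q then sd.getD p 0 else 0)).sum = 0 := by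
      apply List.sum_eq_zero
      intro x hx
      obtain ⟨p, hp, rfl⟩ := List.mem_map.mp hx
      rw [if_neg (by have := List.mem_range.mp hp; omega)]
    rw [hz, List.getD_eq_getElem?_getD, List.getElem?_append_right (by omega)]
    have hlt : q - sd.length < mx.toNat := by omega
    simp [hlt]

-- one step: A's wrapped scatter equals B's summed circular shifts
lemma step_eq (sd d : List Int) (hne : d ≠ []) (hn : 0 < sd.length)
    (hm : 0 ≤ dmax d) (hlo : ∀ f ∈ d, -((sd.length : Int) + dmax d) ≤ f) :
    stepA sd d = stepB sd d ∧
    (stepA sd d).length = ((sd.length : Int) + dmax d).toNat := by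
  cases h : PySem.List.max? d (fun x => x) with
  | none => exact absurd ((PySem.List.max?_eq_none_iff _ _).mp h) hne
  | some m =>
    have hmd : dmax d = m := by rw [dmax, h, Option.getD_some]
    rw [hmd] at hm hlo ⊢
    have hmax : ∀ y ∈ d, y ≤ m := PySem.List.max?_isMax h
    have h1 : 1 ≤ (sd.length : Int) + m := by omega
    obtain ⟨lr, vr⟩ := outerLoop sd m d h1 (fun f hf => ⟨hlo f hf, hmax f hf⟩)
      (List.replicate ((sd.length : Int) + m).toNat 0) (by simp)
    have hA : stepA sd d = d.foldl (fun new_sd np =>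
        (List.range sd.length).foldl (fun ns (p : Nat) =>
          PySem.List.pySetD ns ((p : Int) + np)
            (PySem.List.pyGetD ns ((p : Int) + np) 0 + sd.getD p 0)) new_sd)
        (List.replicate ((sd.length : Int) + m).toNat 0) := by
      simp only [stepA, h, Option.getD_some]
    have hAlen : (stepA sd d).length = ((sd.length : Int) + m).toNat := by
      rw [hA]
      simpa using lr
    refine ⟨?_, hAlen⟩
    -- B side
    set padded : List Int := sd ++ List.replicate m.toNat 0 with hpad
    have hpadlen : padded.length = ((sd.length : Int) + m).toNat := by
      simp [hpad]
      omega
    have hpadI : (padded.length : Int) = (sd.length : Int) + m := by omega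
    have hB : stepB sd d = (zipStar (d.map (fun f =>
        PySem.List.slice padded (some (-f)) none ++
        PySem.List.slice padded none (some (-f))))).map List.sum := by
      simp only [stepB, h, Option.getD_some, hpad]
    have hrows : ∀ r ∈ d.map (fun f =>
        PySem.List.slice padded (some (-f)) none ++
        PySem.List.slice padded none (some (-f))), r.length = ((sd.length : Int) + m).toNat := by
      intro r hr
      obtain ⟨f, hf, rfl⟩ := List.mem_map.mp hr
      rw [rot_length padded f (by rw [hpadI]; exact hlo f hf)
        (by rw [hpadI]; have := hmax f hf; omega), hpadlen]
    have hmapne : d.map (fun f =>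
        PySem.List.slice padded (some (-f)) none ++
        PySem.List.slice padded none (some (-f))) ≠ [] := by
      simpa using hne
    rw [hB, zipStar_spec _ _ hmapne hrows, List.map_map]
    apply List.ext_getElem
    · rw [hAlen]
      simp
    · intro i hi1 hi2
      have hiL : i < ((sd.length : Int) + m).toNat := by rwa [hAlen] at hi1
      rw [List.getElem_map, List.getElem_range]
      simp only [Function.comp, List.map_map]
      rw [← List.getD_eq_getElem _ 0, hA, vr i]
      have hrep : (List.replicate ((sd.length : Int) + m).toNat (0 : Int)).getD i 0 = 0 := by
        simp [List.getD_eq_getElem?_getD, hiL]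
      rw [hrep, zero_add]
      refine congrArg List.sum (List.map_congr_left (fun f hf => ?_))
      simp only [Function.comp_apply]
      have hfl := hlo f hf
      have hfm := hmax f hf
      rw [face_sum sd m f i hm (by omega)]
      rw [rot_getD padded f i (by rw [hpadI]; omega) (by rw [hpadI]; omega) (by omega)]
      rw [hpadI]

-- the two programs agree, and A's array length is the running 1 + Σ max (positive)
lemma main_eq (ds : List (List Int)) (hpre : Pre_get_score_d ds) :
    get_score_d ds = get_score_d_alt ds ∧
    ((get_score_d ds).length : Int) = 1 + (ds.map dmax).sum ∧
    0 < (get_score_d ds).length := by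
  induction ds using List.reverseRecOn with
  | nil =>
    exact ⟨by simp [get_score_d, get_score_d_alt], by simp [get_score_d], by simp [get_score_d]⟩
  | append_singleton ds d ih =>
    have hpre' : Pre_get_score_d ds := by
      intro i hi
      have h := hpre i (by simp; omega)
      have hget : (ds ++ [d])[i]'(by simp; omega) = ds[i] := List.getElem_append_left hi
      have hpl : preL (ds ++ [d]) i = preL ds i := by
        unfold preL
        rw [List.take_append_of_le_length (by omega)]
      rw [hget, hpl] at h
      exact h
    have hlast := hpre ds.length (by simp)
    have hgetl : (ds ++ [d])[ds.length]'(by simp) = d := List.getElem_concat_length rfl _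
    have hpll : preL (ds ++ [d]) ds.length = 1 + ((ds.map dmax).sum + dmax d) := by
      unfold preL
      rw [show ds.length + 1 = (ds ++ [d]).length from by simp, List.take_length,
        List.map_append, List.sum_append]
      simp
    rw [hgetl, hpll] at hlast
    obtain ⟨hdne, hdm, hflo⟩ := hlast
    obtain ⟨ihEq, ihLen, ihPos⟩ := ih hpre'
    obtain ⟨hstepEq, hstepLen⟩ := step_eq (get_score_d ds) d hdne ihPos hdm
      (fun f hf => by have := hflo f hf; omega)
    have hA : get_score_d (ds ++ [d]) = stepA (get_score_d ds) d := by
      simp [get_score_d, List.foldl_append]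
    have hB : get_score_d_alt (ds ++ [d]) = stepB (get_score_d_alt ds) d := by
      simp [get_score_d_alt, List.foldl_append]
    have hsum : ((ds ++ [d]).map dmax).sum = (ds.map dmax).sum + dmax d := by
      rw [List.map_append, List.sum_append]
      simp
    refine ⟨by rw [hA, hB, ← ihEq, hstepEq], ?_, ?_⟩
    · rw [hA, hstepLen, hsum, ihLen]
      omega
    · rw [hA, hstepLen]
      omega

-- ===== VERDICT (by name: the statement is the Claim_ definition above) =====
theorem get_score_d_spec : Claim_equal_get_score_d :=
  fun dices _ hpre => (main_eq dices hpre).1
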